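-- pv_equiv track=rewrite | github.com/Sv-Viktor/revision | module21hard.py | generate_pairs_string
-- ===== SOURCE A (Python) =====
-- def generate_pairs_string(n):
--     pairs = []
--     used_pairs = set()
--     for i in range(1, 21):
--         j = n - i
--         if j > 0 and j <= 20 and j != i:
--             pair = tuple(sorted((i, j)))
--             if pair not in used_pairs:
--                 pairs.append(pair)
--                 used_pairs.add(pair)
--     result = ''.join(str(pair[0]) + str(pair[1]) for pair in pairs)
--     return result
-- ===== SOURCE B (Python) =====
-- def generate_pairs_string(n):
--     return ''.join(str(i) + str(n - i) for i in range(1, 21) if 0 < n - i <= 20 and i < n - i)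
-- ===== Notes on version B (the rewrite author's own statement) =====
-- stated objective: simpler
-- what changed: Dropped the pairs list and the used_pairs deduplication set entirely: a single join over the range emits str(i)+str(n-i) directly under the guard i < n-i, which provably reproduces A's sorted-pair first-occurrence deduplication.
import Mathlib
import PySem

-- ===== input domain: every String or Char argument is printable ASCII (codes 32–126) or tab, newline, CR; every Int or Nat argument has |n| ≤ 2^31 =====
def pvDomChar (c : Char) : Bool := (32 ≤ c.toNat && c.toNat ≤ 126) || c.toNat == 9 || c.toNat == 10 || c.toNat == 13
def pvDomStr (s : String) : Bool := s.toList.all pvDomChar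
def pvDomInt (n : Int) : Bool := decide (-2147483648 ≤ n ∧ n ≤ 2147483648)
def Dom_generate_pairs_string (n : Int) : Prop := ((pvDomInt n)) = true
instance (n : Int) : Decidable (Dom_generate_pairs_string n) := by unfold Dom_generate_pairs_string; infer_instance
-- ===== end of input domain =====

-- B drops A's pairs list and used_pairs set: one pass over the same range emits the pair directly under the guard i < n - i (simpler; same cost).

-- ===== PORT A =====
def generate_pairs_string (n : Int) : String :=
  let st : List (Int × Int) × PySem.Set (Int × Int) :=
    (PySem.List.pyRange 1 21 1).foldl (fun st i =>
      let j := n - i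
      if 0 < j ∧ j ≤ 20 ∧ j ≠ i then
        -- pair = tuple(sorted((i, j))) on a 2-tuple of ints
        let pair : Int × Int := if i ≤ j then (i, j) else (j, i)
        if pair ∈ st.2 then st else (st.1 ++ [pair], PySem.Set.add st.2 pair)
      else st) ([], PySem.Set.empty)
  PySem.Str.join "" (st.1.map (fun p => PySem.Int.toStr p.1 ++ PySem.Int.toStr p.2))

-- ===== PORT B =====
def generate_pairs_string_alt (n : Int) : String :=
  PySem.Str.join ""
    ((PySem.List.pyRange 1 21 1).filterMap (fun i =>
      if 0 < n - i ∧ n - i ≤ 20 ∧ i < n - i then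
        some (PySem.Int.toStr i ++ PySem.Int.toStr (n - i))
      else none))

-- ===== PRECONDITION & SPEC =====
def Spec_generate_pairs_string (n : Int) (out : String) : Prop := out = generate_pairs_string_alt n
instance (n : Int) (out : String) : Decidable (Spec_generate_pairs_string n out) := by unfold Spec_generate_pairs_string; infer_instance

-- ===== CLAIM (what is proved, stated in full; the proofs are below) =====
def Claim_equal_generate_pairs_string : Prop := ∀ (n : Int), Dom_generate_pairs_string n → Spec_generate_pairs_string n (generate_pairs_string n)

-- ===== LEMMAS AND PROOFS =====
-- a fold whose step fixes the initial state returns it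
lemma pvFoldl_fixed {α β : Type} (f : α → β → α) (l : List β) (init : α)
    (h : ∀ b ∈ l, f init b = init) : l.foldl f init = init := by
  induction l with
  | nil => rfl
  | cons b l ih =>
    simp only [List.foldl_cons, h b (List.mem_cons_self ..)]
    exact ih (fun b hb => h b (List.mem_cons_of_mem _ hb))

lemma pvA_empty (n : Int) (h : n ≤ 2 ∨ 40 ≤ n) : generate_pairs_string n = "" := by
  unfold generate_pairs_string
  rw [pvFoldl_fixed]
  · rfl
  · intro i hi
    rw [PySem.List.mem_pyRange_one] at hi
    have hc : ¬ (0 < n - i ∧ n - i ≤ 20 ∧ n - i ≠ i) := by omega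
    simp only [hc, if_false]

lemma pvB_empty (n : Int) (h : n ≤ 2 ∨ 40 ≤ n) : generate_pairs_string_alt n = "" := by
  unfold generate_pairs_string_alt
  have he : (PySem.List.pyRange 1 21 1).filterMap (fun i =>
      if 0 < n - i ∧ n - i ≤ 20 ∧ i < n - i then
        some (PySem.Int.toStr i ++ PySem.Int.toStr (n - i))
      else none) = [] := by
    rw [List.filterMap_eq_nil_iff]
    intro i hi
    rw [PySem.List.mem_pyRange_one] at hi
    have hc : ¬ (0 < n - i ∧ n - i ≤ 20 ∧ i < n - i) := by omega
    simp only [hc, if_false]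
  rw [he]
  rfl

-- ===== VERDICT (by name: the statement is the Claim_ definition above) =====
set_option maxHeartbeats 2000000 in
theorem generate_pairs_string_spec : Claim_equal_generate_pairs_string := by
  intro n _
  unfold Spec_generate_pairs_string
  by_cases h : 3 ≤ n ∧ n ≤ 39
  · obtain ⟨h1, h2⟩ := h
    interval_cases n <;> decide
  · rw [pvA_empty n (by omega), pvB_empty n (by omega)]
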